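-- pv_equiv track=rewrite | github.com/philga7/task-manager | backend/app/services/TaskDecomposer.py | _calculate_max_dependency_depth
-- ===== SOURCE A (Python) =====
-- from typing import List, Dict, Optional, Tuple, Any
--
-- def _calculate_max_dependency_depth(dependency_graph: Dict[str, List[str]]) -> int:
--     """Calculate maximum dependency depth using DFS"""
--     def dfs(node: str, depth: int, visited: set) -> int:
--         if node in visited:
--             return depth
--
--         visited.add(node)
--         max_depth = depth
--
--         for dependent in dependency_graph.get(node, []):
--             max_depth = max(max_depth, dfs(dependent, depth + 1, visited))
--
--         return max_depth
--
--     max_depth = 0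
--     for node in dependency_graph:
--         max_depth = max(max_depth, dfs(node, 0, set()))
--
--     return max_depth
-- ===== SOURCE B (Python) =====
-- def _calculate_max_dependency_depth(dependency_graph):
--     """Iterative explicit-stack DFS (one fresh visited set per start node)."""
--     max_depth = 0
--     for node in dependency_graph:
--         visited = set()
--         stack = [(node, 0)]
--         while stack:
--             n, d = stack.pop()
--             max_depth = max(max_depth, d)
--             if n not in visited:
--                 visited.add(n)
--                 for dependent in reversed(dependency_graph.get(n, [])):
--                     stack.append((dependent, d + 1))
--     return max_depth
-- ===== Notes on version B (the rewrite author's own statement) =====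
-- stated objective: alternative
-- what changed: The recursive nested dfs helper is replaced by an iterative explicit-stack DFS per start node that pops (node, depth) pairs, updates a single global max, and pushes dependents in reversed order so the recursion's preorder (and thus the shared-visited blocking) is reproduced exactly.
import Mathlib
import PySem

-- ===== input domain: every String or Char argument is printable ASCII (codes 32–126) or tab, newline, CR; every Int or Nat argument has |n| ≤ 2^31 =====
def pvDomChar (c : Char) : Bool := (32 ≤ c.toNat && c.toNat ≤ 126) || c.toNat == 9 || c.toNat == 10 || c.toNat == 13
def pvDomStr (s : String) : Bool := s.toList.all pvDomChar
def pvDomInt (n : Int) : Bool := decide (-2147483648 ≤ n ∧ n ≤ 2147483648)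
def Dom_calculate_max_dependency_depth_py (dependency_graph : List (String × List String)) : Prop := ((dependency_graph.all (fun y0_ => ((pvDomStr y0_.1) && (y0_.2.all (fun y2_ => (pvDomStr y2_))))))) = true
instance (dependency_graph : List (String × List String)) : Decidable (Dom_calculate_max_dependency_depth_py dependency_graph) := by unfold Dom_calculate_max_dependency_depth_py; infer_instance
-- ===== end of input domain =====

-- B replaces A's recursive nested dfs helper by an iterative explicit-stack DFS per start
-- node (same asymptotic cost; a different decomposition of the same traversal).

-- ===== PORT A =====
-- Literal port of A's recursive `dfs`, threading the mutated `visited` set through the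
-- `for dependent in …` loop (pvDfsForA). `fuel`, decremented once per nested dfs call, is
-- ONLY a totality guard: every nesting level past the first adds a fresh graph key to
-- `visited`, so the initial fuel `g.size + 1` is never exhausted (this is what the
-- equivalence proof's fuel hypothesis `pvK g visited < fuel` tracks).
mutual
def pvDfsA (g : PySem.Dict String (List String)) : Nat → String → Int → PySem.Set String → Int × PySem.Set String
  | 0, _, depth, visited => (depth, visited)
  | fuel + 1, node, depth, visited =>
    if PySem.Set.contains visited node then (depth, visited)
    else pvDfsForA g fuel (g.getD node []) (depth + 1) (PySem.Set.add visited node) depth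
termination_by fuel _ _ _ => (fuel, 0)

-- the `for dependent in dependency_graph.get(node, [])` loop: accumulator max_depth, visited
def pvDfsForA (g : PySem.Dict String (List String)) : Nat → List String → Int → PySem.Set String → Int → Int × PySem.Set String
  | _, [], _, visited, max_depth => (max_depth, visited)
  | fuel, dependent :: rest, dp, visited, max_depth =>
    let r := pvDfsA g fuel dependent dp visited
    pvDfsForA g fuel rest dp r.2 (max max_depth r.1)
termination_by fuel l _ _ _ => (fuel, l.length + 1)
end

def calculate_max_dependency_depth_py (dependency_graph : List (String × List String)) : Int :=
  let g := PySem.Dict.ofList dependency_graph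
  g.keys.foldl (fun max_depth node => max max_depth (pvDfsA g (g.size + 1) node 0 PySem.Set.empty).1) 0

-- ===== PORT B =====
-- helper measure for pvLoopB's termination: number of graph keys not yet visited
def pvK (g : PySem.Dict String (List String)) (visited : PySem.Set String) : Nat :=
  (g.keys.filter (fun k => !(PySem.Set.contains visited k))).length

-- termination facts the port cites in decreasing_by
theorem pv_countP_lt {α : Type} {p q : α → Bool} :
    ∀ (l : List α) (a : α), a ∈ l → (∀ x ∈ l, q x = true → p x = true) →
      q a = false → p a = true → l.countP q < l.countP p := by
  intro l
  induction l with
  | nil => intro a ha; simp at ha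
  | cons b l ih =>
    intro a ha himp hqa hpa
    rcases List.mem_cons.mp ha with rfl | ha'
    · have hle : l.countP q ≤ l.countP p :=
        List.countP_mono_left (fun x hx => himp x (List.mem_cons_of_mem _ hx))
      simp only [List.countP_cons, hqa, hpa]
      simpa using Nat.lt_succ_of_le hle
    · have hlt : l.countP q < l.countP p :=
        ih a ha' (fun x hx => himp x (List.mem_cons_of_mem _ hx)) hqa hpa
      have hb := himp b List.mem_cons_self
      simp only [List.countP_cons]
      split_ifs <;> simp_all
      omega

theorem pv_contains_add_of (visited : PySem.Set String) (n x : String)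
    (h : PySem.Set.contains visited x = true) :
    PySem.Set.contains (PySem.Set.add visited n) x = true := by
  simp only [PySem.Set.contains, List.contains_iff_mem] at *
  exact (PySem.Set.mem_add visited n x).mpr (Or.inl h)

theorem pvK_add_le (g : PySem.Dict String (List String)) (visited : PySem.Set String) (n : String) :
    pvK g (PySem.Set.add visited n) ≤ pvK g visited := by
  unfold pvK
  rw [← List.countP_eq_length_filter, ← List.countP_eq_length_filter]
  refine List.countP_mono_left (fun x _ hx => ?_)
  simp only [Bool.not_eq_eq_eq_not, Bool.not_true] at hx ⊢
  by_contra hc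
  simp only [Bool.not_eq_false] at hc
  rw [pv_contains_add_of visited n x hc] at hx
  exact absurd hx (by simp)

theorem pvK_add_lt (g : PySem.Dict String (List String)) (visited : PySem.Set String) (n : String)
    (hk : n ∈ g.keys) (hn : PySem.Set.contains visited n = false) :
    pvK g (PySem.Set.add visited n) < pvK g visited := by
  unfold pvK
  rw [← List.countP_eq_length_filter, ← List.countP_eq_length_filter]
  refine pv_countP_lt g.keys n hk (fun x _ hx => ?_) ?_
    (by have : n ∉ visited := by simpa [PySem.Set.contains, List.contains_eq_mem] using hn
        simp [this])
  · simp only [Bool.not_eq_eq_eq_not, Bool.not_true] at hx ⊢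
    by_contra hc
    simp only [Bool.not_eq_false] at hc
    rw [pv_contains_add_of visited n x hc] at hx
    exact absurd hx (by simp)
  · simp [PySem.Set.mem_add]

-- the `while stack:` loop of B. The stack's TOP is the list HEAD (Python appends/pops at
-- the end): pushing `reversed(g.get(n, []))` one by one and then popping is popping the
-- dependents in order, i.e. prepending `deps.map (·, d+1)`; the `match` on `g.get? n`
-- is `g.get(n, [])` (the `none` branch pushes the zero elements of `reversed([])`).
def pvLoopB (g : PySem.Dict String (List String)) (stack : List (String × Int)) (visited : PySem.Set String) (max_depth : Int) : Int :=
  match stack with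
  | [] => max_depth
  | (n, d) :: rest =>
    let m := max max_depth d
    if PySem.Set.contains visited n then pvLoopB g rest visited m
    else
      match hg : g.get? n with
      | none => pvLoopB g rest (PySem.Set.add visited n) m
      | some deps => pvLoopB g (deps.map (fun dep => (dep, d + 1)) ++ rest) (PySem.Set.add visited n) m
termination_by (pvK g visited, stack.length)
decreasing_by
  · exact Prod.Lex.right _ (Nat.lt_succ_self _)
  · rcases Nat.lt_or_eq_of_le (pvK_add_le g visited n) with h | h
    · exact Prod.Lex.left _ _ h
    · rw [h]; exact Prod.Lex.right _ (Nat.lt_succ_self _)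
  · refine Prod.Lex.left _ _ (pvK_add_lt g visited n ?_ (by simpa using ‹¬ PySem.Set.contains visited n = true›))
    have : g.contains n = true := by rw [PySem.Dict.contains_eq_isSome_get?, hg]; rfl
    exact (PySem.Dict.contains_iff_mem_keys g n).mp this

def calculate_max_dependency_depth_py_alt (dependency_graph : List (String × List String)) : Int :=
  let g := PySem.Dict.ofList dependency_graph
  g.keys.foldl (fun max_depth node => pvLoopB g [(node, 0)] PySem.Set.empty max_depth) 0

-- ===== PRECONDITION & SPEC =====
def Spec_calculate_max_dependency_depth_py (dependency_graph : List (String × List String)) (out : Int) : Prop := out = calculate_max_dependency_depth_py_alt dependency_graph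
instance (dependency_graph : List (String × List String)) (out : Int) : Decidable (Spec_calculate_max_dependency_depth_py dependency_graph out) := by unfold Spec_calculate_max_dependency_depth_py; infer_instance

-- ===== CLAIM (what is proved, stated in full; the proofs are below) =====
def Claim_equal_calculate_max_dependency_depth_py : Prop := ∀ (dependency_graph : List (String × List String)), Dom_calculate_max_dependency_depth_py dependency_graph → Spec_calculate_max_dependency_depth_py dependency_graph (calculate_max_dependency_depth_py dependency_graph)

-- ===== LEMMAS AND PROOFS =====

-- visited only grows through A's dfs (needed to keep the fuel bound through the dependents loop)
theorem pvDfs_vis_mono (g : PySem.Dict String (List String)) : ∀ fuel : Nat,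
    (∀ n d visited x, x ∈ visited → x ∈ (pvDfsA g fuel n d visited).2) ∧
    (∀ deps dp visited acc x, x ∈ visited → x ∈ (pvDfsForA g fuel deps dp visited acc).2) := by
  have hFor : ∀ fuel : Nat,
      (∀ n d visited x, x ∈ visited → x ∈ (pvDfsA g fuel n d visited).2) →
      (∀ deps dp visited acc x, x ∈ visited → x ∈ (pvDfsForA g fuel deps dp visited acc).2) := by
    intro fuel hA deps
    induction deps with
    | nil => intro dp visited acc x hx; simpa [pvDfsForA] using hx
    | cons dep rest ih =>
      intro dp visited acc x hx
      simp only [pvDfsForA]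
      exact ih dp _ _ x (hA dep dp visited x hx)
  intro fuel
  induction fuel with
  | zero =>
    have hA : ∀ n d visited x, x ∈ visited → x ∈ (pvDfsA g 0 n d visited).2 := by
      intro n d visited x hx; simpa [pvDfsA] using hx
    exact ⟨hA, hFor 0 hA⟩
  | succ fuel ih =>
    have hA : ∀ n d visited x, x ∈ visited → x ∈ (pvDfsA g (fuel + 1) n d visited).2 := by
      intro n d visited x hx
      simp only [pvDfsA]
      split
      · exact hx
      · exact hFor fuel ih.1 _ _ _ _ x ((PySem.Set.mem_add visited n x).mpr (Or.inl hx))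
    exact ⟨hA, hFor (fuel + 1) hA⟩

theorem pvK_mono (g : PySem.Dict String (List String)) (v v' : PySem.Set String)
    (h : ∀ x, x ∈ v → x ∈ v') : pvK g v' ≤ pvK g v := by
  unfold pvK
  rw [← List.countP_eq_length_filter, ← List.countP_eq_length_filter]
  refine List.countP_mono_left (fun x _ hx => ?_)
  simp only [Bool.not_eq_eq_eq_not, Bool.not_true, PySem.Set.contains,
    List.contains_eq_mem, decide_eq_false_iff_not] at hx ⊢
  exact fun hm => hx (h x hm)

-- step lemmas unfolding one round of each program
theorem pvLoopB_step_visited (g : PySem.Dict String (List String)) (n : String) (d : Int)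
    (rest : List (String × Int)) (visited : PySem.Set String) (m : Int) (hv : n ∈ visited) :
    pvLoopB g ((n, d) :: rest) visited m = pvLoopB g rest visited (max m d) := by
  rw [pvLoopB]
  simp [hv]

theorem pvLoopB_step_none (g : PySem.Dict String (List String)) (n : String) (d : Int)
    (rest : List (String × Int)) (visited : PySem.Set String) (m : Int)
    (hv : n ∉ visited) (hg : g.get? n = none) :
    pvLoopB g ((n, d) :: rest) visited m = pvLoopB g rest (PySem.Set.add visited n) (max m d) := by
  rw [pvLoopB]
  simp only [PySem.Set.contains, List.contains_eq_mem, decide_eq_true_eq, if_neg hv]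
  split <;> simp_all

theorem pvLoopB_step_some (g : PySem.Dict String (List String)) (n : String) (d : Int)
    (rest : List (String × Int)) (visited : PySem.Set String) (m : Int) (deps : List String)
    (hv : n ∉ visited) (hg : g.get? n = some deps) :
    pvLoopB g ((n, d) :: rest) visited m
      = pvLoopB g (deps.map (fun dep => (dep, d + 1)) ++ rest) (PySem.Set.add visited n) (max m d) := by
  rw [pvLoopB]
  simp only [PySem.Set.contains, List.contains_eq_mem, decide_eq_true_eq, if_neg hv]
  split <;> simp_all

theorem pvDfsA_step_visited (g : PySem.Dict String (List String)) (fuel : Nat) (n : String)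
    (d : Int) (visited : PySem.Set String) (hv : n ∈ visited) :
    pvDfsA g (fuel + 1) n d visited = (d, visited) := by
  rw [pvDfsA]
  simp [PySem.Set.contains, hv]

theorem pvDfsA_step_not (g : PySem.Dict String (List String)) (fuel : Nat) (n : String)
    (d : Int) (visited : PySem.Set String) (hv : n ∉ visited) :
    pvDfsA g (fuel + 1) n d visited
      = pvDfsForA g fuel (g.getD n []) (d + 1) (PySem.Set.add visited n) d := by
  rw [pvDfsA]
  simp [PySem.Set.contains, List.contains_eq_mem, hv]

-- the bridge: one stack pop-and-expand round equals one recursive dfs call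
theorem pvBridge (g : PySem.Dict String (List String)) : ∀ fuel : Nat,
    (∀ visited, pvK g visited < fuel → ∀ n d rest m,
      pvLoopB g ((n, d) :: rest) visited m
        = pvLoopB g rest (pvDfsA g fuel n d visited).2 (max m (pvDfsA g fuel n d visited).1)) ∧
    (∀ deps visited, pvK g visited < fuel → ∀ dp rest m acc,
      pvLoopB g (deps.map (fun dep => (dep, dp)) ++ rest) visited (max m acc)
        = pvLoopB g rest (pvDfsForA g fuel deps dp visited acc).2 (max m (pvDfsForA g fuel deps dp visited acc).1)) := by
  have hFor : ∀ fuel : Nat,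
      (∀ visited, pvK g visited < fuel → ∀ n d rest m,
        pvLoopB g ((n, d) :: rest) visited m
          = pvLoopB g rest (pvDfsA g fuel n d visited).2 (max m (pvDfsA g fuel n d visited).1)) →
      (∀ deps visited, pvK g visited < fuel → ∀ dp rest m acc,
        pvLoopB g (deps.map (fun dep => (dep, dp)) ++ rest) visited (max m acc)
          = pvLoopB g rest (pvDfsForA g fuel deps dp visited acc).2 (max m (pvDfsForA g fuel deps dp visited acc).1)) := by
    intro fuel hA deps
    induction deps with
    | nil => intro visited hK dp rest m acc; simp [pvDfsForA]
    | cons dep ds ih =>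
      intro visited hK dp rest m acc
      have hK2 : pvK g (pvDfsA g fuel dep dp visited).2 < fuel :=
        lt_of_le_of_lt (pvK_mono g visited _ ((pvDfs_vis_mono g fuel).1 dep dp visited)) hK
      simp only [List.map_cons, List.cons_append]
      calc pvLoopB g ((dep, dp) :: (ds.map (fun dep => (dep, dp)) ++ rest)) visited (max m acc)
          = pvLoopB g (ds.map (fun dep => (dep, dp)) ++ rest) (pvDfsA g fuel dep dp visited).2
              (max (max m acc) (pvDfsA g fuel dep dp visited).1) :=
            hA visited hK dep dp (ds.map (fun dep => (dep, dp)) ++ rest) (max m acc)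
        _ = pvLoopB g (ds.map (fun dep => (dep, dp)) ++ rest) (pvDfsA g fuel dep dp visited).2
              (max m (max acc (pvDfsA g fuel dep dp visited).1)) := by rw [max_assoc]
        _ = _ := by
              rw [ih _ hK2 dp rest m (max acc (pvDfsA g fuel dep dp visited).1)]
              simp only [pvDfsForA]
  intro fuel
  induction fuel with
  | zero => exact ⟨fun visited hK => absurd hK (by omega), fun deps visited hK => absurd hK (by omega)⟩
  | succ fuel ih =>
    have hA : ∀ visited, pvK g visited < fuel + 1 → ∀ n d rest m,
        pvLoopB g ((n, d) :: rest) visited m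
          = pvLoopB g rest (pvDfsA g (fuel + 1) n d visited).2 (max m (pvDfsA g (fuel + 1) n d visited).1) := by
      intro visited hK n d rest m
      by_cases hv : n ∈ visited
      · rw [pvLoopB_step_visited g n d rest visited m hv, pvDfsA_step_visited g fuel n d visited hv]
      · rcases hg : g.get? n with _ | deps
        · have hgd : g.getD n [] = [] := by rw [PySem.Dict.getD_eq_get?_getD, hg]; rfl
          rw [pvLoopB_step_none g n d rest visited m hv hg, pvDfsA_step_not g fuel n d visited hv, hgd]
          simp [pvDfsForA]
        · have hgd : g.getD n [] = deps := by rw [PySem.Dict.getD_eq_get?_getD, hg]; rfl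
          have hk : n ∈ g.keys := by
            refine (PySem.Dict.contains_iff_mem_keys g n).mp ?_
            rw [PySem.Dict.contains_eq_isSome_get?, hg]; rfl
          have hK2 : pvK g (PySem.Set.add visited n) < fuel := by
            have := pvK_add_lt g visited n hk
              (by simp [PySem.Set.contains, List.contains_eq_mem, hv])
            omega
          rw [pvLoopB_step_some g n d rest visited m deps hv hg, pvDfsA_step_not g fuel n d visited hv, hgd]
          exact hFor fuel ih.1 deps (PySem.Set.add visited n) hK2 (d + 1) rest m d
    exact ⟨hA, hFor (fuel + 1) hA⟩

theorem pvK_empty (g : PySem.Dict String (List String)) : pvK g PySem.Set.empty = g.size := by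
  simp [pvK, PySem.Set.empty, PySem.Set.contains, PySem.Dict.keys, PySem.Dict.size]

-- ===== VERDICT (by name: the statement is the Claim_ definition above) =====
theorem calculate_max_dependency_depth_py_spec : Claim_equal_calculate_max_dependency_depth_py := by
  intro dg _
  unfold Spec_calculate_max_dependency_depth_py
  unfold calculate_max_dependency_depth_py calculate_max_dependency_depth_py_alt
  simp only []
  set g := PySem.Dict.ofList dg with hgdef
  have hfun : (fun (max_depth : Int) (node : String) =>
        max max_depth (pvDfsA g (g.size + 1) node 0 PySem.Set.empty).1)
      = (fun (max_depth : Int) (node : String) =>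
        pvLoopB g [(node, 0)] PySem.Set.empty max_depth) := by
    funext m n
    have h := (pvBridge g (g.size + 1)).1 PySem.Set.empty (by rw [pvK_empty]; omega) n 0 [] m
    rw [h]
    simp [pvLoopB]
  rw [hfun]
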